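-- pv_equiv track=rewrite | github.com/wan-catherine/Leetcode | problems/N1488_Avoid_Flood_In_The_City.py | avoidFlood_bs
-- ===== SOURCE A (Python) =====
-- def avoidFlood_bs(rains):
--     """
--     :type rains: List[int]
--     :rtype: List[int]
--     """
--     import collections
--     lakes = collections.defaultdict(list)
--     dry_days = []
--     days = len(rains)
--     res = [0] * days
--     for day in range(days):
--         if rains[day] == 0:
--             dry_days.append(day)
--         else:
--             lakes[rains[day]].append(day)
--             if len(lakes[rains[day]]) > 1:
--                 first = lakes[rains[day]][-2]
--                 left,right = 0, len(dry_days)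
--                 previous = -1
--                 while left < right:
--                     mid = (right - left) // 2 + left
--                     if dry_days[mid] > first:
--                         previous = mid
--                         right = mid
--                     else:
--                         left = mid+1
--                 if previous > -1:
--                     res[dry_days[previous]] = rains[day]
--                     res[day] = -1
--                     del lakes[rains[day]][-2]
--                     del dry_days[previous]
--                 else:
--                     return []
--             else:
--                 res[day] = -1
--     for i in range(days):
--         if res[i] == 0:
--             res[i] = 1
--     return res
-- ===== SOURCE B (Python) =====
-- def avoidFlood_bs(rains):
--     """Greedy with a union-find "next unused dry day" pointer structure
--     (path halving): find(last[lake]+1) yields the earliest still-unused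
--     dry day after the previous rain of that lake."""
--     n = len(rains)
--     # parent[d] = d if day d is an (unused) dry day, else the next candidate d+1
--     parent = [d if d < n and rains[d] == 0 else d + 1 if d < n else n
--               for d in range(n + 1)]
--
--     def find(x):
--         while parent[x] != x:
--             parent[x] = parent[parent[x]]
--             x = parent[x]
--         return x
--
--     res = [1 if r == 0 else -1 for r in rains]
--     last = {}
--     for day, lake in enumerate(rains):
--         if lake != 0:
--             if lake in last:
--                 d = find(last[lake] + 1)
--                 if d >= day:
--                     return []
--                 res[d] = lake
--                 parent[d] = d + 1
--             last[lake] = day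
--     return res
-- ===== Notes on version B (the rewrite author's own statement) =====
-- stated objective: alternative
-- what changed: Replaces A's per-rain binary search over a repeatedly-deleted dry-day list with a single-pass greedy using a union-find 'next unused dry day' pointer array with path halving and a last-occurrence dict.
import Mathlib
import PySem

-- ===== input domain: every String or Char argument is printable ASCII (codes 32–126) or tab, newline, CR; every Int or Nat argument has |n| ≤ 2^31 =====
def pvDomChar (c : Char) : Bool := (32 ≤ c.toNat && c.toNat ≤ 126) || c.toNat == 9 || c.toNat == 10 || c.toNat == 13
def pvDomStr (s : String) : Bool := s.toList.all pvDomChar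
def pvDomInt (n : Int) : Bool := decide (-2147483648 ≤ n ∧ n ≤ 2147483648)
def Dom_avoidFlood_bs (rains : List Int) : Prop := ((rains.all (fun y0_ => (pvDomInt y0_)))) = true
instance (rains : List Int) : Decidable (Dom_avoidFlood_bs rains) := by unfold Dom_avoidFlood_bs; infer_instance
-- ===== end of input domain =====

-- B replaces A's binary search over a repeatedly-deleted dry-day list by a union-find
-- "next unused dry day" pointer structure (objective: alternative algorithm).

-- ===== PORT A =====
-- A's inner `while left < right` binary search; `previous` carries the best index found (-1 = none).
-- dry-day values and the search bounds are day indices, hence Nat; dry.getD mid 0 is exact since mid < right ≤ dry.length at use.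
def pvBSearch (dry : List Nat) (first : Nat) (left right : Nat) (previous : Int) : Int :=
  if _h : left < right then
    let mid := (right - left) / 2 + left
    if dry.getD mid 0 > first then pvBSearch dry first left mid (Int.ofNat mid)
    else pvBSearch dry first (mid + 1) right previous
  else previous
termination_by right - left
decreasing_by all_goals omega

-- A's `for day in range(days)` loop with early `return []` modelled as none.
def pvALoop (rains : List Int) (n day : Nat) (lakes : PySem.Dict Int (List Nat))
    (dry : List Nat) (res : List Int) : Option (List Int) :=
  if _h : day < n then
    let r := rains.getD day 0      -- rains[day], exact: day < n = len(rains)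
    if r = 0 then
      pvALoop rains n (day + 1) lakes (dry ++ [day]) res
    else
      let lks := (lakes.getD r []) ++ [day]        -- defaultdict(list) append
      let lakes1 := lakes.insert r lks
      if lks.length > 1 then
        let first := lks.getD (lks.length - 2) 0   -- lakes[rains[day]][-2]
        let previous := pvBSearch dry first 0 dry.length (-1)
        if previous > -1 then
          let p := previous.toNat
          let res1 := (res.set (dry.getD p 0) r).set day (-1)
          let lakes2 := lakes1.insert r (lks.eraseIdx (lks.length - 2))  -- del lakes[r][-2]
          pvALoop rains n (day + 1) lakes2 (dry.eraseIdx p) res1         -- del dry_days[previous]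
        else none
      else
        pvALoop rains n (day + 1) lakes1 dry (res.set day (-1))
  else some res
termination_by n - day

def avoidFlood_bs (rains : List Int) : List Int :=
  let days := rains.length
  match pvALoop rains days 0 (PySem.Dict.mk []) [] (List.replicate days 0) with
  | none => []
  | some res => res.map (fun x => if x = 0 then 1 else x)   -- final `if res[i]==0: res[i]=1` pass

-- ===== PORT B =====
-- B's path-halving find: while parent[x] != x: parent[x] = parent[parent[x]]; x = parent[x].
-- fuel = n+1 only makes the loop total; x strictly increases and stays ≤ n on reachable states.
def pvFind (fuel : Nat) (parent : List Nat) (x : Nat) : List Nat × Nat :=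
  match fuel with
  | 0 => (parent, x)
  | fuel + 1 =>
    let px := parent.getD x 0
    if px = x then (parent, x)
    else
      let g := parent.getD px 0
      pvFind fuel (parent.set x g) g

-- B's `for day, lake in enumerate(rains)` loop with early `return []` modelled as none.
def pvBLoop (rains : List Int) (n day : Nat) (parent : List Nat)
    (last : PySem.Dict Int Nat) (res : List Int) : Option (List Int) :=
  if _h : day < n then
    let lake := rains.getD day 0
    if lake ≠ 0 then
      match last.get? lake with
      | some lo =>
        let pr := pvFind (n + 1) parent (lo + 1)
        if pr.2 ≥ day then none
        else
          pvBLoop rains n (day + 1) (pr.1.set pr.2 (pr.2 + 1))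
            (last.insert lake day) (res.set pr.2 lake)
      | none => pvBLoop rains n (day + 1) parent (last.insert lake day) res
    else pvBLoop rains n (day + 1) parent last res
  else some res
termination_by n - day

def avoidFlood_bs_alt (rains : List Int) : List Int :=
  let n := rains.length
  let parent := (List.range (n + 1)).map
    (fun d => if d < n ∧ rains.getD d 0 = 0 then d else if d < n then d + 1 else n)
  let res := rains.map (fun r => if r = 0 then (1 : Int) else -1)
  match pvBLoop rains n 0 parent (PySem.Dict.mk []) res with
  | none => []
  | some r => r

-- ===== PRECONDITION & SPEC =====
def Spec_avoidFlood_bs (rains : List Int) (out : List Int) : Prop := out = avoidFlood_bs_alt rains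
instance (rains : List Int) (out : List Int) : Decidable (Spec_avoidFlood_bs rains out) := by unfold Spec_avoidFlood_bs; infer_instance

-- ===== CLAIM (what is proved, stated in full; the proofs are below) =====
def Claim_equal_avoidFlood_bs : Prop := ∀ (rains : List Int), Dom_avoidFlood_bs rains → Spec_avoidFlood_bs rains (avoidFlood_bs rains)

-- ===== LEMMAS AND PROOFS =====

-- basic getD/set facts
theorem pvGetD_set_self {α : Type} (l : List α) (i : Nat) (v d : α) (h : i < l.length) :
    (l.set i v).getD i d = v := by
  simp [List.getD, h]

theorem pvGetD_set_ne {α : Type} (l : List α) (i j : Nat) (v d : α) (h : i ≠ j) :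
    (l.set i v).getD j d = l.getD j d := by
  simp [List.getD, h]

-- "unused dry day" predicate encoded by A's res array
def pvUb (rains resA : List Int) (d : Nat) : Bool :=
  decide (d < rains.length) && decide (rains.getD d 0 = 0) && decide (resA.getD d 0 = 0)

-- invariant of B's parent array w.r.t. an "unused dry" predicate u
def pvPInv (n : Nat) (parent : List Nat) (u : Nat → Bool) : Prop :=
  parent.length = n + 1 ∧ parent.getD n 0 = n ∧
  ∀ x, x < n →
    (u x = true → parent.getD x 0 = x) ∧
    (u x = false → x < parent.getD x 0 ∧ parent.getD x 0 ≤ n ∧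
      ∀ y, x ≤ y → y < parent.getD x 0 → u y = false)

-- least y ≥ x with u y (or n)
def pvMin (n : Nat) (u : Nat → Bool) (x : Nat) : Nat :=
  if _h : x < n then (if u x then x else pvMin n u (x + 1)) else n
termination_by n - x

theorem pvMin_ge (n : Nat) (u : Nat → Bool) (x : Nat) (hx : x ≤ n) : x ≤ pvMin n u x := by
  fun_induction pvMin n u x with
  | case1 x h hu => omega
  | case2 x h hu ih => have := ih (by omega); omega
  | case3 x h => omega


theorem pvMin_le_n (n : Nat) (u : Nat → Bool) (x : Nat) : pvMin n u x ≤ n := by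
  fun_induction pvMin n u x with
  | case1 x h hu => omega
  | case2 x h hu ih => exact ih
  | case3 x h => omega


theorem pvMin_true (n : Nat) (u : Nat → Bool) (x : Nat) (h : pvMin n u x < n) :
    u (pvMin n u x) = true := by
  fun_induction pvMin n u x with
  | case1 x h hu => simpa using hu
  | case2 x h hu ih => exact ih h
  | case3 x hn => omega


theorem pvMin_below (n : Nat) (u : Nat → Bool) (x : Nat) :
    ∀ y, x ≤ y → y < pvMin n u x → u y = false := by
  fun_induction pvMin n u x with
  | case1 x h hu => intro y h1 h2; omega
  | case2 x h hu ih =>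
    intro y h1 h2
    rcases Nat.eq_or_lt_of_le h1 with rfl | h1'
    · simpa using hu
    · exact ih y h1' h2
  | case3 x h => intro y h1 h2; omega


theorem pvMin_le (n : Nat) (u : Nat → Bool) (x y : Nat) (hxy : x ≤ y) (_hy : y < n)
    (hu : u y = true) : pvMin n u x ≤ y := by
  by_contra hc
  push Not at hc
  have := pvMin_below n u x y hxy hc
  simp [hu] at this


theorem pvMin_skip (n : Nat) (u : Nat → Bool) (x g : Nat) (hxg : x ≤ g) (hg : g ≤ n)
    (hfree : ∀ y, x ≤ y → y < g → u y = false) : pvMin n u x = pvMin n u g := by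
  induction g with
  | zero =>
    have : x = 0 := by omega
    simp [this]
  | succ g ih =>
    rcases Nat.eq_or_lt_of_le hxg with rfl | hlt
    · rfl
    · have hxg' : x ≤ g := by omega
      have h1 : pvMin n u x = pvMin n u g := ih hxg' (by omega) (fun y hy1 hy2 => hfree y hy1 (by omega))
      have hgn : g < n := by omega
      have h2 : pvMin n u g = pvMin n u (g + 1) := by
        rw [pvMin]
        simp [hgn, hfree g (by omega) (by omega)]
      omega


theorem pvPInv_congr (n : Nat) (parent : List Nat) (u u' : Nat → Bool)
    (h : pvPInv n parent u) (hu : ∀ y, u y = u' y) : pvPInv n parent u' := by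
  obtain ⟨h1, h2, h3⟩ := h
  refine ⟨h1, h2, fun x hx => ⟨fun hux => (h3 x hx).1 (by rw [hu x]; exact hux), ?_⟩⟩
  intro hux
  obtain ⟨a1, a2, a3⟩ := (h3 x hx).2 (by rw [hu x]; exact hux)
  exact ⟨a1, a2, fun y hy1 hy2 => by rw [← hu y]; exact a3 y hy1 hy2⟩


-- find returns the least unused dry day ≥ x and preserves the parent invariant
theorem pvFind_spec (n : Nat) (u : Nat → Bool) :
    ∀ fuel parent x, pvPInv n parent u → x ≤ n → n + 1 - x ≤ fuel →
      (pvFind fuel parent x).2 = pvMin n u x ∧ pvPInv n (pvFind fuel parent x).1 u := by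
  intro fuel
  induction fuel with
  | zero => intro parent x _ hx hf; omega
  | succ fuel ih =>
    intro parent x hp hx hf
    obtain ⟨hlen, hn, hinv⟩ := hp
    by_cases hxn : x = n
    · subst hxn
      have hpx : parent.getD x 0 = x := hn
      rw [pvFind]
      simp only [hpx, if_pos]
      rw [pvMin]
      simp only [lt_irrefl, dite_false]
      exact ⟨by trivial, hlen, hn, hinv⟩
    · have hx' : x < n := lt_of_le_of_ne hx hxn
      cases hux : u x with
      | true =>
        have hpx : parent.getD x 0 = x := (hinv x hx').1 hux
        rw [pvFind]
        simp only [hpx, if_pos]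
        rw [pvMin]
        simp only [hx', hux, dite_true, if_true]
        exact ⟨by trivial, hlen, hn, hinv⟩
      | false =>
        obtain ⟨b1, b2, b3⟩ := (hinv x hx').2 hux
        have hpxne : ¬ parent.getD x 0 = x := by omega
        rw [pvFind]
        simp only [hpxne, ite_false]
        set px := parent.getD x 0 with hpx
        set g := parent.getD px 0 with hg
        have hgprop : x < g ∧ g ≤ n ∧ ∀ y, x ≤ y → y < g → u y = false := by
          by_cases hpn : px = n
          · have : g = n := by rw [hg, hpn]; exact hn
            exact ⟨by omega, by omega, fun y hy1 hy2 => b3 y hy1 (by omega)⟩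
          · have hpxn : px < n := lt_of_le_of_ne b2 hpn
            cases hupx : u px with
            | true =>
              have : g = px := (hinv px hpxn).1 hupx
              exact ⟨by omega, by omega, fun y hy1 hy2 => b3 y hy1 (by omega)⟩
            | false =>
              obtain ⟨c1, c2, c3⟩ := (hinv px hpxn).2 hupx
              refine ⟨by omega, c2, fun y hy1 hy2 => ?_⟩
              by_cases hyp : y < px
              · exact b3 y hy1 hyp
              · exact c3 y (by omega) hy2
        obtain ⟨hg1, hg2, hg3⟩ := hgprop
        have hxlen : x < parent.length := by omega
        have hinv1 : pvPInv n (parent.set x g) u := by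
          refine ⟨by simp [hlen], ?_, ?_⟩
          · rw [pvGetD_set_ne parent x n g 0 hxn]; exact hn
          · intro z hz
            by_cases hzx : z = x
            · subst hzx
              constructor
              · intro h; rw [hux] at h; exact absurd h (by simp)
              · intro _
                rw [pvGetD_set_self parent z g 0 hxlen]
                exact ⟨hg1, hg2, hg3⟩
            · rw [pvGetD_set_ne parent x z g 0 (fun h => hzx h.symm)]
              exact hinv z hz
        have := ih (parent.set x g) g hinv1 hg2 (by omega)
        rw [pvMin_skip n u x g (by omega) hg2 hg3]
        exact this


-- A's binary search: characterisation of the result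
theorem pvBSearch_aux (dry : List Nat) (first : Nat)
    (mono : ∀ i j, i ≤ j → j < dry.length → dry.getD i 0 ≤ dry.getD j 0) :
    ∀ k l r (prev : Int), r - l ≤ k → l ≤ r → r ≤ dry.length →
      (∀ i, i < l → dry.getD i 0 ≤ first) →
      (∀ i, r ≤ i → i < dry.length → first < dry.getD i 0) →
      prev = (if r < dry.length then (r : Int) else -1) →
      ∃ r', r' ≤ dry.length ∧ (∀ i, i < r' → dry.getD i 0 ≤ first) ∧
        (∀ i, r' ≤ i → i < dry.length → first < dry.getD i 0) ∧
        pvBSearch dry first l r prev = (if r' < dry.length then (r' : Int) else -1) := by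
  intro k
  induction k with
  | zero =>
    intro l r prev hk hlr hrlen hlow hhigh hprev
    have hnl : ¬ l < r := by omega
    rw [pvBSearch, dif_neg hnl]
    exact ⟨r, hrlen, fun i hi => hlow i (by omega), hhigh, hprev⟩
  | succ k ihk =>
    intro l r prev hk hlr hrlen hlow hhigh hprev
    by_cases h : l < r
    · rw [pvBSearch, dif_pos h]
      simp only []
      set mid := (r - l) / 2 + l with hmid
      have hmid1 : l ≤ mid := by omega
      have hmid2 : mid < r := by omega
      by_cases hc : dry.getD mid 0 > first
      · rw [if_pos hc]
        refine ihk l mid (Int.ofNat mid) (by omega) (by omega) (by omega) hlow ?_ ?_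
        · intro i hi1 hi2
          exact lt_of_lt_of_le hc (mono mid i hi1 hi2)
        · have : mid < dry.length := by omega
          simp [this]
      · rw [if_neg hc]
        refine ihk (mid + 1) r prev (by omega) (by omega) hrlen ?_ hhigh hprev
        intro i hi
        exact le_trans (mono i mid (by omega) (by omega)) (by omega)
    · have hnl : ¬ l < r := h
      rw [pvBSearch, dif_neg hnl]
      exact ⟨r, hrlen, fun i hi => hlow i (by omega), hhigh, hprev⟩


theorem pvBSearch_spec (dry : List Nat) (first : Nat) (hs : dry.Pairwise (· < ·)) :
    ∃ r', r' ≤ dry.length ∧ (∀ i, i < r' → dry.getD i 0 ≤ first) ∧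
      (∀ i, r' ≤ i → i < dry.length → first < dry.getD i 0) ∧
      pvBSearch dry first 0 dry.length (-1) = (if r' < dry.length then (r' : Int) else -1) := by
  have mono : ∀ i j, i ≤ j → j < dry.length → dry.getD i 0 ≤ dry.getD j 0 := by
    intro i j hij hj
    rcases Nat.eq_or_lt_of_le hij with rfl | hlt
    · exact le_refl _
    · have hi : i < dry.length := by omega
      have := List.pairwise_iff_getElem.mp hs i j hi hj hlt
      simp [List.getD, hi, hj]
      omega
  refine pvBSearch_aux dry first mono (dry.length - 0) 0 dry.length (-1) (by omega) (by omega) (le_refl _)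
    (fun i hi => by omega) (fun i hi1 hi2 => by omega) (by simp)


theorem pvGetD_lt (l : List Nat) (i : Nat) (h : i < l.length) : l.getD i 0 = l[i] := by
  simp [List.getD, h]

-- the coupled invariant of A's and B's loop states
structure PvInv (rains : List Int) (day : Nat) (lakes : PySem.Dict Int (List Nat))
    (dry : List Nat) (resA : List Int) (parent : List Nat)
    (last : PySem.Dict Int Nat) (resB : List Int) : Prop where
  hday : day ≤ rains.length
  hlenA : resA.length = rains.length
  hlenB : resB.length = rains.length
  hlakes : ∀ r : Int, r ≠ 0 →
    lakes.getD r [] = (match last.get? r with | none => [] | some lo => [lo])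
  hlast : ∀ r lo, last.get? r = some lo → lo < day
  hsorted : dry.Pairwise (· < ·)
  hmem : ∀ e, e ∈ dry ↔ (e < day ∧ pvUb rains resA e = true)
  hpar : pvPInv rains.length parent (pvUb rains resA)
  hfut : ∀ d, day ≤ d → d < rains.length → resA.getD d 0 = 0
  hres : ∀ d, d < rains.length →
    resB.getD d 0 = (if resA.getD d 0 = 0 then (if rains.getD d 0 = 0 then (1 : Int) else -1)
                     else resA.getD d 0)
  hrz : ∀ d, d < day → rains.getD d 0 ≠ 0 → resA.getD d 0 ≠ 0

-- pvUb helpers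
theorem pvUb_true_iff (rains resA : List Int) (d : Nat) :
    pvUb rains resA d = true ↔ (d < rains.length ∧ rains.getD d 0 = 0 ∧ resA.getD d 0 = 0) := by
  simp [pvUb, and_assoc]

theorem pvUb_set_ne (rains resA : List Int) (d i : Nat) (v : Int) (h : i ≠ d) :
    pvUb rains (resA.set i v) d = pvUb rains resA d := by
  unfold pvUb
  rw [pvGetD_set_ne resA i d v 0 h]

theorem pvUb_rain_false (rains resA : List Int) (d : Nat) (hr : rains.getD d 0 ≠ 0) :
    pvUb rains resA d = false := by
  unfold pvUb
  rw [decide_eq_false hr]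
  simp

-- one-step unfoldings of A's loop
theorem pvALoop_step_dry (rains : List Int) (n day : Nat) (lakes : PySem.Dict Int (List Nat))
    (dry : List Nat) (resA : List Int) (h : day < n) (hr : rains.getD day 0 = 0) :
    pvALoop rains n day lakes dry resA = pvALoop rains n (day + 1) lakes (dry ++ [day]) resA := by
  rw [pvALoop, dif_pos h]
  rw [if_pos hr]

theorem pvALoop_step_new (rains : List Int) (n day : Nat) (lakes : PySem.Dict Int (List Nat))
    (dry : List Nat) (resA : List Int) (h : day < n) (hr : rains.getD day 0 ≠ 0)
    (hlk : lakes.getD (rains.getD day 0) [] = []) :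
    pvALoop rains n day lakes dry resA =
      pvALoop rains n (day + 1) (lakes.insert (rains.getD day 0) [day]) dry (resA.set day (-1)) := by
  rw [pvALoop, dif_pos h]
  rw [if_neg hr, hlk]
  norm_num

theorem pvALoop_step_rep_found (rains : List Int) (n day : Nat) (lakes : PySem.Dict Int (List Nat))
    (dry : List Nat) (resA : List Int) (lo p : Nat) (h : day < n) (hr : rains.getD day 0 ≠ 0)
    (hlk : lakes.getD (rains.getD day 0) [] = [lo])
    (hbs : pvBSearch dry lo 0 dry.length (-1) = (p : Int)) :
    pvALoop rains n day lakes dry resA =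
      pvALoop rains n (day + 1)
        ((lakes.insert (rains.getD day 0) [lo, day]).insert (rains.getD day 0) [day])
        (dry.eraseIdx p)
        ((resA.set (dry.getD p 0) (rains.getD day 0)).set day (-1)) := by
  rw [pvALoop, dif_pos h]
  rw [if_neg hr, hlk]
  norm_num [hbs]
  intro hc
  exfalso
  omega

theorem pvALoop_step_rep_none (rains : List Int) (n day : Nat) (lakes : PySem.Dict Int (List Nat))
    (dry : List Nat) (resA : List Int) (lo : Nat) (h : day < n) (hr : rains.getD day 0 ≠ 0)
    (hlk : lakes.getD (rains.getD day 0) [] = [lo])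
    (hbs : pvBSearch dry lo 0 dry.length (-1) = -1) :
    pvALoop rains n day lakes dry resA = none := by
  rw [pvALoop, dif_pos h]
  rw [if_neg hr, hlk]
  norm_num [hbs]

-- one-step unfoldings of B's loop
theorem pvBLoop_step_zero (rains : List Int) (n day : Nat) (parent : List Nat)
    (last : PySem.Dict Int Nat) (resB : List Int) (h : day < n) (hr : rains.getD day 0 = 0) :
    pvBLoop rains n day parent last resB = pvBLoop rains n (day + 1) parent last resB := by
  rw [pvBLoop, dif_pos h]
  rw [if_neg (not_not_intro hr)]

theorem pvBLoop_step_new (rains : List Int) (n day : Nat) (parent : List Nat)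
    (last : PySem.Dict Int Nat) (resB : List Int) (h : day < n) (hr : rains.getD day 0 ≠ 0)
    (hlo : last.get? (rains.getD day 0) = none) :
    pvBLoop rains n day parent last resB =
      pvBLoop rains n (day + 1) parent (last.insert (rains.getD day 0) day) resB := by
  rw [pvBLoop, dif_pos h]
  rw [if_pos hr, hlo]

theorem pvBLoop_step_rep_found (rains : List Int) (n day : Nat) (parent : List Nat)
    (last : PySem.Dict Int Nat) (resB : List Int) (lo m : Nat) (par1 : List Nat)
    (h : day < n) (hr : rains.getD day 0 ≠ 0)
    (hlo : last.get? (rains.getD day 0) = some lo)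
    (hfind : pvFind (n + 1) parent (lo + 1) = (par1, m)) (hm : m < day) :
    pvBLoop rains n day parent last resB =
      pvBLoop rains n (day + 1) (par1.set m (m + 1))
        (last.insert (rains.getD day 0) day) (resB.set m (rains.getD day 0)) := by
  rw [pvBLoop, dif_pos h]
  rw [if_pos hr, hlo]
  simp only [hfind]
  rw [if_neg (by omega)]

theorem pvBLoop_step_rep_none (rains : List Int) (n day : Nat) (parent : List Nat)
    (last : PySem.Dict Int Nat) (resB : List Int) (lo m : Nat) (par1 : List Nat)
    (h : day < n) (hr : rains.getD day 0 ≠ 0)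
    (hlo : last.get? (rains.getD day 0) = some lo)
    (hfind : pvFind (n + 1) parent (lo + 1) = (par1, m)) (hm : day ≤ m) :
    pvBLoop rains n day parent last resB = none := by
  rw [pvBLoop, dif_pos h]
  rw [if_pos hr, hlo]
  simp only [hfind]
  rw [if_pos (by omega)]

theorem pvLoop_equiv (rains : List Int) :
    ∀ k day lakes dry resA parent last resB, rains.length - day = k →
      PvInv rains day lakes dry resA parent last resB →
      (pvALoop rains rains.length day lakes dry resA = none ∧
       pvBLoop rains rains.length day parent last resB = none) ∨
      (∃ ra rb, pvALoop rains rains.length day lakes dry resA = some ra ∧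
        pvBLoop rains rains.length day parent last resB = some rb ∧
        rb = ra.map (fun x => if x = 0 then 1 else x)) := by
  intro k
  induction k with
  | zero =>
    intro day lakes dry resA parent last resB hk inv
    have hdn : ¬ day < rains.length := by have := inv.hday; omega
    have hde : day = rains.length := by have := inv.hday; omega
    rw [pvALoop, dif_neg hdn, pvBLoop, dif_neg hdn]
    right
    refine ⟨resA, resB, rfl, rfl, ?_⟩
    apply List.ext_getElem (by simp [inv.hlenA, inv.hlenB])
    intro i h1 h2
    have hi : i < rains.length := by have := inv.hlenB; omega
    have hiA : i < resA.length := by have := inv.hlenA; omega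
    have hres := inv.hres i hi
    rw [List.getElem_map]
    have hBg : resB.getD i 0 = resB[i] := by simp [List.getD, h1]
    have hAg : resA.getD i 0 = resA[i] := by simp [List.getD, hiA]
    rw [hBg, hAg] at hres
    rw [hres]
    by_cases hz : resA[i] = 0
    · have hrz : rains.getD i 0 = 0 := by
        by_contra hc
        exact (inv.hrz i (by omega) hc) (by rw [hAg]; exact hz)
      rw [if_pos hz, if_pos hz, if_pos hrz]
    · rw [if_neg hz, if_neg hz]
  | succ k ih =>
    intro day lakes dry resA parent last resB hk inv
    have hdn : day < rains.length := by have := inv.hday; omega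
    have hlenA := inv.hlenA
    have hlenB := inv.hlenB
    by_cases hr0 : rains.getD day 0 = 0
    · rw [pvALoop_step_dry rains rains.length day lakes dry resA hdn hr0,
          pvBLoop_step_zero rains rains.length day parent last resB hdn hr0]
      refine ih (day + 1) lakes (dry ++ [day]) resA parent last resB (by omega) ?_
      have huday : pvUb rains resA day = true := by
        rw [pvUb_true_iff]
        exact ⟨hdn, hr0, inv.hfut day le_rfl hdn⟩
      refine ⟨by omega, hlenA, hlenB, inv.hlakes, ?_, ?_, ?_, inv.hpar, ?_, inv.hres, ?_⟩
      · intro r lo h; exact Nat.lt_succ_of_lt (inv.hlast r lo h)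
      · rw [List.pairwise_append]
        refine ⟨inv.hsorted, List.pairwise_singleton _ _, ?_⟩
        intro a ha b hb
        rw [List.mem_singleton] at hb
        subst hb
        exact ((inv.hmem a).1 ha).1
      · intro e
        rw [List.mem_append, List.mem_singleton, inv.hmem e]
        constructor
        · rintro (⟨h1, h2⟩ | rfl)
          · exact ⟨by omega, h2⟩
          · exact ⟨by omega, huday⟩
        · rintro ⟨h1, h2⟩
          by_cases he : e = day
          · right; exact he
          · left; exact ⟨by omega, h2⟩
      · intro d hd1 hd2; exact inv.hfut d (by omega) hd2
      · intro d hd hrd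
        by_cases he : d = day
        · subst he; exact absurd hr0 hrd
        · exact inv.hrz d (by omega) hrd
    · cases hlo : last.get? (rains.getD day 0) with
      | none =>
        have hlk : lakes.getD (rains.getD day 0) [] = [] := by
          have := inv.hlakes _ hr0; rw [hlo] at this; exact this
        rw [pvALoop_step_new rains rains.length day lakes dry resA hdn hr0 hlk,
            pvBLoop_step_new rains rains.length day parent last resB hdn hr0 hlo]
        refine ih (day + 1) _ dry (resA.set day (-1)) parent _ resB (by omega) ?_
        have hulem : ∀ e, pvUb rains (resA.set day (-1)) e = pvUb rains resA e := by
          intro e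
          by_cases he : e = day
          · subst he
            rw [pvUb_rain_false _ _ _ hr0, pvUb_rain_false _ _ _ hr0]
          · exact pvUb_set_ne rains resA e day (-1) (fun hh => he hh.symm)
        refine ⟨by omega, by simp [hlenA], hlenB, ?_, ?_, inv.hsorted, ?_, ?_, ?_, ?_, ?_⟩
        · intro r' hr'
          by_cases hrr : r' = rains.getD day 0
          · subst hrr
            rw [PySem.Dict.getD_insert_self, PySem.Dict.get?_insert_self]
          · rw [PySem.Dict.getD_insert_of_ne _ _ _ hrr, PySem.Dict.get?_insert_of_ne _ _ hrr]
            exact inv.hlakes r' hr'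
        · intro r' lo' h
          by_cases hrr : r' = rains.getD day 0
          · subst hrr
            rw [PySem.Dict.get?_insert_self] at h
            simp only [Option.some.injEq] at h
            omega
          · rw [PySem.Dict.get?_insert_of_ne _ _ hrr] at h
            exact Nat.lt_succ_of_lt (inv.hlast r' lo' h)
        · intro e
          rw [inv.hmem e, hulem e]
          constructor
          · rintro ⟨h1, h2⟩; exact ⟨by omega, h2⟩
          · rintro ⟨h1, h2⟩
            by_cases he : e = day
            · subst he
              rw [pvUb_rain_false _ _ _ hr0] at h2
              cases h2
            · exact ⟨by omega, h2⟩
        · exact pvPInv_congr _ _ _ _ inv.hpar (fun y => (hulem y).symm)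
        · intro d hd1 hd2
          rw [pvGetD_set_ne resA day d (-1) 0 (by omega)]
          exact inv.hfut d (by omega) hd2
        · intro d hd
          by_cases he : d = day
          · subst he
            rw [pvGetD_set_self resA d (-1) 0 (by omega)]
            have h0 : resA.getD d 0 = 0 := inv.hfut d le_rfl hdn
            have := inv.hres d hdn
            rw [h0] at this
            simp only [if_neg hr0] at this
            rw [this]
            norm_num
          · rw [pvGetD_set_ne resA day d (-1) 0 (by omega)]
            exact inv.hres d hd
        · intro d hd hrd
          by_cases he : d = day
          · subst he
            rw [pvGetD_set_self resA d (-1) 0 (by omega)]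
            norm_num
          · rw [pvGetD_set_ne resA day d (-1) 0 (by omega)]
            exact inv.hrz d (by omega) hrd
      | some lo =>
        have hlk : lakes.getD (rains.getD day 0) [] = [lo] := by
          have := inv.hlakes _ hr0; rw [hlo] at this; exact this
        have hlod : lo < day := inv.hlast _ lo hlo
        obtain ⟨hfm, hfp⟩ := pvFind_spec rains.length (pvUb rains resA) (rains.length + 1)
          parent (lo + 1) inv.hpar (by omega) (by omega)
        obtain ⟨r', hr'len, hr'low, hr'high, hr'eq⟩ := pvBSearch_spec dry lo inv.hsorted
        have hfind : pvFind (rains.length + 1) parent (lo + 1) =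
            ((pvFind (rains.length + 1) parent (lo + 1)).1,
             pvMin rains.length (pvUb rains resA) (lo + 1)) := by
          rw [← hfm]
        have hm_ge : lo + 1 ≤ pvMin rains.length (pvUb rains resA) (lo + 1) :=
          pvMin_ge _ _ _ (by omega)
        have hm_len : pvMin rains.length (pvUb rains resA) (lo + 1) ≤ rains.length :=
          pvMin_le_n _ _ _
        set m := pvMin rains.length (pvUb rains resA) (lo + 1) with hmdef
        by_cases hmday : m < day
        · have hum : pvUb rains resA m = true := pvMin_true _ _ _ (by omega)
          have hmdry : m ∈ dry := (inv.hmem m).2 ⟨hmday, hum⟩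
          obtain ⟨jm, hjm, hjmeq⟩ := List.getElem_of_mem hmdry
          have hr'lt : r' < dry.length := by
            by_contra hc
            have hjr : jm < r' := by omega
            have := hr'low jm hjr
            rw [pvGetD_lt dry jm hjm, hjmeq] at this
            omega
          have hgetr' : dry.getD r' 0 = dry[r'] := pvGetD_lt dry r' hr'lt
          have her_mem : dry[r'] ∈ dry := List.getElem_mem hr'lt
          obtain ⟨herd, heru⟩ := (inv.hmem _).1 her_mem
          have hlo_lt : lo < dry[r'] := by
            have := hr'high r' le_rfl hr'lt
            rw [hgetr'] at this
            exact this
          have h1m : m ≤ dry[r'] := pvMin_le _ _ _ _ (by omega) (by omega) heru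
          have h2m : r' ≤ jm := by
            by_contra hc
            have := hr'low jm (by omega)
            rw [pvGetD_lt dry jm hjm, hjmeq] at this
            omega
          have h3m : dry[r'] ≤ m := by
            rcases Nat.eq_or_lt_of_le h2m with heq | hlt
            · subst heq; omega
            · have := List.pairwise_iff_getElem.mp inv.hsorted r' jm hr'lt hjm hlt
              rw [hjmeq] at this
              omega
          have hdm : dry.getD r' 0 = m := by rw [hgetr']; omega
          have hbs : pvBSearch dry lo 0 dry.length (-1) = (r' : Int) := by
            rw [hr'eq, if_pos hr'lt]
          rw [pvALoop_step_rep_found rains rains.length day lakes dry resA lo r' hdn hr0 hlk hbs,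
              pvBLoop_step_rep_found rains rains.length day parent last resB lo m
                (pvFind (rains.length + 1) parent (lo + 1)).1 hdn hr0 hlo hfind hmday]
          rw [hdm]
          refine ih (day + 1) _ _ _ _ _ _ (by omega) ?_
          have hmne_day : m ≠ day := by omega
          have hmlt_n : m < rains.length := by omega
          have hmlenA : m < resA.length := by omega
          have hu'm : pvUb rains ((resA.set m (rains.getD day 0)).set day (-1)) m = false := by
            have heq : ((resA.set m (rains.getD day 0)).set day (-1)).getD m 0 = rains.getD day 0 := by
              rw [pvGetD_set_ne _ day m (-1) 0 (by omega),
                  pvGetD_set_self resA m (rains.getD day 0) 0 hmlenA]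
            unfold pvUb
            rw [decide_eq_false (show ¬ ((resA.set m (rains.getD day 0)).set day (-1)).getD m 0 = 0 by
              rw [heq]; exact hr0)]
            simp
          have hu'e : ∀ e, e ≠ m →
              pvUb rains ((resA.set m (rains.getD day 0)).set day (-1)) e = pvUb rains resA e := by
            intro e he
            by_cases hed : e = day
            · subst hed
              rw [pvUb_rain_false _ _ _ hr0, pvUb_rain_false _ _ _ hr0]
            · rw [pvUb_set_ne _ _ e day (-1) (fun hh => hed hh.symm),
                  pvUb_set_ne _ _ e m (rains.getD day 0) (fun hh => he hh.symm)]
          have hdrysort := inv.hsorted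
          refine ⟨by omega, by simp [hlenA], by simp [hlenB], ?_, ?_, ?_, ?_, ?_, ?_, ?_, ?_⟩
          · intro r'' hr''
            by_cases hrr : r'' = rains.getD day 0
            · subst hrr
              rw [PySem.Dict.getD_insert_self, PySem.Dict.get?_insert_self]
            · rw [PySem.Dict.getD_insert_of_ne _ _ _ hrr, PySem.Dict.getD_insert_of_ne _ _ _ hrr,
                  PySem.Dict.get?_insert_of_ne _ _ hrr]
              exact inv.hlakes r'' hr''
          · intro r'' lo' h
            by_cases hrr : r'' = rains.getD day 0
            · subst hrr
              rw [PySem.Dict.get?_insert_self] at h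
              simp only [Option.some.injEq] at h
              omega
            · rw [PySem.Dict.get?_insert_of_ne _ _ hrr] at h
              exact Nat.lt_succ_of_lt (inv.hlast r'' lo' h)
          · exact List.Pairwise.eraseIdx r' hdrysort
          · intro e
            rw [List.mem_eraseIdx_iff_getElem]
            constructor
            · rintro ⟨j, hj, hjne, rfl⟩
              have hedry : dry[j] ∈ dry := List.getElem_mem hj
              obtain ⟨hed, heu⟩ := (inv.hmem _).1 hedry
              have hne : dry[j] ≠ m := by
                intro hc
                rcases Nat.lt_or_ge j r' with hlt | hge
                · have := List.pairwise_iff_getElem.mp hdrysort j r' hj hr'lt hlt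
                  omega
                · have hlt : r' < j := by omega
                  have := List.pairwise_iff_getElem.mp hdrysort r' j hr'lt hj hlt
                  omega
              rw [hu'e _ hne]
              exact ⟨by omega, heu⟩
            · rintro ⟨h1, h2⟩
              have hne : e ≠ m := by
                intro hc; subst hc; rw [hu'm] at h2; cases h2
              rw [hu'e _ hne] at h2
              have heday : e ≠ day := by
                intro hc; subst hc
                rw [pvUb_rain_false _ _ _ hr0] at h2
                cases h2
              have hedry : e ∈ dry := (inv.hmem e).2 ⟨by omega, h2⟩
              obtain ⟨j, hj, hje⟩ := List.getElem_of_mem hedry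
              refine ⟨j, hj, ?_, hje⟩
              intro hc; subst hc; omega
          · obtain ⟨p1, p2, p3⟩ := hfp
            have hmlenP : m < (pvFind (rains.length + 1) parent (lo + 1)).1.length := by omega
            refine ⟨by simp [p1], ?_, ?_⟩
            · rw [pvGetD_set_ne _ m rains.length (m + 1) 0 (by omega)]
              exact p2
            · intro x hx
              by_cases hxm : x = m
              · subst hxm
                constructor
                · intro habs; rw [hu'm] at habs; cases habs
                · intro _
                  rw [pvGetD_set_self _ m (m + 1) 0 hmlenP]
                  refine ⟨by omega, by omega, fun y hy1 hy2 => ?_⟩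
                  have hym : y = m := by omega
                  rw [hym]
                  exact hu'm
              · rw [pvGetD_set_ne _ m x (m + 1) 0 (fun hh => hxm hh.symm)]
                constructor
                · intro hux
                  rw [hu'e x hxm] at hux
                  exact (p3 x hx).1 hux
                · intro hux
                  rw [hu'e x hxm] at hux
                  obtain ⟨c1, c2, c3⟩ := (p3 x hx).2 hux
                  refine ⟨c1, c2, fun y hy1 hy2 => ?_⟩
                  by_cases hym : y = m
                  · subst hym; exact hu'm
                  · rw [hu'e y hym]; exact c3 y hy1 hy2
          · intro d hd1 hd2
            rw [pvGetD_set_ne _ day d (-1) 0 (by omega),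
                pvGetD_set_ne resA m d (rains.getD day 0) 0 (by omega)]
            exact inv.hfut d (by omega) hd2
          · intro d hd
            by_cases hdm' : d = m
            · rw [hdm']
              rw [pvGetD_set_ne _ day m (-1) 0 (by omega),
                  pvGetD_set_self resA m (rains.getD day 0) 0 hmlenA,
                  pvGetD_set_self resB m (rains.getD day 0) 0 (by omega)]
              rw [if_neg hr0]
            · by_cases hdday : d = day
              · rw [hdday]
                rw [pvGetD_set_self _ day (-1) 0 (by rw [List.length_set, hlenA]; omega),
                    pvGetD_set_ne resB m day (rains.getD day 0) 0 (by omega)]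
                have h0 : resA.getD day 0 = 0 := inv.hfut day le_rfl hdn
                have := inv.hres day hdn
                rw [h0] at this
                simp only [if_neg hr0] at this
                rw [this]
                norm_num
              · rw [pvGetD_set_ne _ day d (-1) 0 (by omega),
                    pvGetD_set_ne resA m d (rains.getD day 0) 0 (by omega),
                    pvGetD_set_ne resB m d (rains.getD day 0) 0 (by omega)]
                exact inv.hres d hd
          · intro d hd hrd
            by_cases hdm' : d = m
            · rw [pvUb_true_iff] at hum
              rw [hdm'] at hrd
              exact absurd hum.2.1 hrd
            · by_cases hdday : d = day
              · rw [hdday]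
                rw [pvGetD_set_self _ day (-1) 0 (by rw [List.length_set, hlenA]; omega)]
                norm_num
              · rw [pvGetD_set_ne _ day d (-1) 0 (by omega),
                    pvGetD_set_ne resA m d (rains.getD day 0) 0 (by omega)]
                exact inv.hrz d (by omega) hrd
        · have hr'full : r' = dry.length := by
            by_contra hc
            have hr'lt : r' < dry.length := by omega
            have her_mem : dry[r'] ∈ dry := List.getElem_mem hr'lt
            obtain ⟨herd, heru⟩ := (inv.hmem _).1 her_mem
            have hlo_lt : lo < dry[r'] := by
              have := hr'high r' le_rfl hr'lt
              rw [pvGetD_lt dry r' hr'lt] at this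
              exact this
            have := pvMin_le rains.length (pvUb rains resA) (lo + 1) dry[r']
              (by omega) (by omega) heru
            omega
          have hbs : pvBSearch dry lo 0 dry.length (-1) = -1 := by
            rw [hr'eq, if_neg (by omega)]
          rw [pvALoop_step_rep_none rains rains.length day lakes dry resA lo hdn hr0 hlk hbs,
              pvBLoop_step_rep_none rains rains.length day parent last resB lo m
                (pvFind (rains.length + 1) parent (lo + 1)).1 hdn hr0 hlo hfind (by omega)]
          left
          exact ⟨rfl, rfl⟩


theorem pvMain : ∀ rains, avoidFlood_bs rains = avoidFlood_bs_alt rains := by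
  intro rains
  have hrep : ∀ x, (List.replicate rains.length (0 : Int)).getD x 0 = 0 := by
    intro x
    rcases Nat.lt_or_ge x rains.length with h | h
    · simp [List.getD, h]
    · simp [List.getD]
  have hP : ∀ i, i < rains.length + 1 →
      ((List.range (rains.length + 1)).map
        (fun d => if d < rains.length ∧ rains.getD d 0 = 0 then d
                  else if d < rains.length then d + 1 else rains.length)).getD i 0 =
      (if i < rains.length ∧ rains.getD i 0 = 0 then i
       else if i < rains.length then i + 1 else rains.length) := by
    intro i hi
    simp [List.getD, hi]
  have hresB : ∀ d, d < rains.length →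
      (rains.map (fun r => if r = 0 then (1 : Int) else -1)).getD d 0 =
        (if rains.getD d 0 = 0 then (1 : Int) else -1) := by
    intro d hd
    simp [List.getD, List.getElem?_map, List.getElem?_eq_getElem hd]
  have inv0 : PvInv rains 0 (PySem.Dict.mk []) [] (List.replicate rains.length 0)
      ((List.range (rains.length + 1)).map
        (fun d => if d < rains.length ∧ rains.getD d 0 = 0 then d
                  else if d < rains.length then d + 1 else rains.length))
      (PySem.Dict.mk []) (rains.map (fun r => if r = 0 then (1 : Int) else -1)) := by
    refine ⟨Nat.zero_le _, by simp, by simp, ?_, ?_, List.Pairwise.nil, ?_, ?_, ?_, ?_, ?_⟩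
    · intro r _; rfl
    · intro r lo h
      rw [show (PySem.Dict.mk ([] : List (Int × Nat))).get? r = none from rfl] at h
      cases h
    · intro e
      constructor
      · intro h; cases h
      · rintro ⟨h, _⟩; omega
    · refine ⟨by simp, ?_, ?_⟩
      · rw [hP rains.length (by omega)]
        simp
      · intro x hx
        constructor
        · intro hux
          rw [pvUb_true_iff] at hux
          rw [hP x (by omega)]
          rw [if_pos ⟨hux.1, hux.2.1⟩]
        · intro hux
          have hxr : ¬ rains.getD x 0 = 0 := by
            intro hc
            rw [show pvUb rains (List.replicate rains.length 0) x = true by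
              rw [pvUb_true_iff]; exact ⟨hx, hc, hrep x⟩] at hux
            cases hux
          rw [hP x (by omega)]
          rw [if_neg (by tauto), if_pos hx]
          refine ⟨by omega, by omega, fun y hy1 hy2 => ?_⟩
          have : y = x := by omega
          rw [this]
          exact hux
    · intro d _ _; exact hrep d
    · intro d hd
      rw [hresB d hd, hrep d]
      simp
    · intro d hd; omega
  have hmain := pvLoop_equiv rains rains.length 0 (PySem.Dict.mk []) []
    (List.replicate rains.length 0)
    ((List.range (rains.length + 1)).map
      (fun d => if d < rains.length ∧ rains.getD d 0 = 0 then d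
                else if d < rains.length then d + 1 else rains.length))
    (PySem.Dict.mk []) (rains.map (fun r => if r = 0 then (1 : Int) else -1)) (by omega) inv0
  unfold avoidFlood_bs avoidFlood_bs_alt
  rcases hmain with ⟨hA, hB⟩ | ⟨ra, rb, hA, hB, hrel⟩
  · simp only [hA, hB]
  · simp only [hA, hB]
    exact hrel.symm


-- ===== VERDICT (by name: the statement is the Claim_ definition above) =====
theorem avoidFlood_bs_spec : Claim_equal_avoidFlood_bs := by
  intro rains _
  unfold Spec_avoidFlood_bs
  exact pvMain rains
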